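-- pv_equiv track=rewrite | github.com/anthonyzhao27/syllabus-parser | backend/app/services/ics.py | _fold_ics_line
-- ===== SOURCE A (Python) =====
-- def _fold_ics_line(line: str, limit: int = 75) -> list[str]:
--     """Fold a content line per RFC 5545 using continuation lines."""
--     if len(line.encode("utf-8")) <= limit:
--         return [line]
--
--     folded: list[str] = []
--     remaining = line
--
--     while remaining:
--         chunk = ""
--         for char in remaining:
--             candidate = chunk + char
--             if len(candidate.encode("utf-8")) > limit and chunk:
--                 break
--             chunk = candidate
--
--         folded.append(chunk if not folded else f" {chunk}")
--         remaining = remaining[len(chunk) :]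
--
--     return folded
-- ===== SOURCE B (Python) =====
-- def _fold_ics_line(line: str, limit: int = 75) -> list[str]:
--     """Fold a content line per RFC 5545 using continuation lines."""
--     if len(line.encode("utf-8")) <= limit:
--         return [line]
--
--     folded: list[str] = []
--     chunk = ""
--     chunk_bytes = 0
--     for char in line:
--         char_bytes = len(char.encode("utf-8"))
--         if chunk and chunk_bytes + char_bytes > limit:
--             folded.append(chunk if not folded else f" {chunk}")
--             chunk = ""
--             chunk_bytes = 0
--         chunk += char
--         chunk_bytes += char_bytes
--     if chunk:
--         folded.append(chunk if not folded else f" {chunk}")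
--     return folded
-- ===== Notes on version B (the rewrite author's own statement) =====
-- stated objective: faster
-- what changed: Replaced A's outer while-loop that re-slices the remaining string and an inner loop that re-encodes the growing chunk prefix on every character with a single linear scan over the characters keeping a running UTF-8 byte counter and flushing the current chunk when the next character would exceed the limit.
import Mathlib
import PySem

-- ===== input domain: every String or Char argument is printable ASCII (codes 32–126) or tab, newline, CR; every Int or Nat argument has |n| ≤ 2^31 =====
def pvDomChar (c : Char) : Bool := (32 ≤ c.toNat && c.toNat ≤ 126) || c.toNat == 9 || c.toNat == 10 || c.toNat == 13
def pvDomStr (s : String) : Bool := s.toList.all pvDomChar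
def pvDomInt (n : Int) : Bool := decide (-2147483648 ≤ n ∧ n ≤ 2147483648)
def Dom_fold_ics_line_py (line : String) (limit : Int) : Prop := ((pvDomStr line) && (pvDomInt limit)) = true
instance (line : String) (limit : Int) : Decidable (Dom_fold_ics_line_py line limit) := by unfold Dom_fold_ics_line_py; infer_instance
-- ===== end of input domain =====

-- B replaces A's outer while-with-slicing and inner re-encoding of growing prefixes by one
-- linear scan keeping a running byte counter (measured faster on large lines).

-- UTF-8 byte length of a list of chars (len(s.encode("utf-8"))); exact for all Unicode chars
def pvUtf8len (l : List Char) : Nat := (l.map Char.utf8Size).sum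

-- ===== PORT A =====
-- A's inner `for char in remaining` loop building the greedy chunk
def pvTakeChunk (limit : Int) (chunk : List Char) : List Char → List Char
  | [] => chunk
  | c :: rs =>
      if (pvUtf8len (chunk ++ [c]) : Int) > limit ∧ chunk ≠ [] then chunk
      else pvTakeChunk limit (chunk ++ [c]) rs

theorem pvTakeChunk_len (limit : Int) (rest : List Char) :
    ∀ chunk : List Char, chunk.length ≤ (pvTakeChunk limit chunk rest).length := by
  induction rest with
  | nil => intro chunk; simp [pvTakeChunk]
  | cons c rs ih =>
      intro chunk
      simp only [pvTakeChunk]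
      split
      · exact le_rfl
      · calc chunk.length ≤ (chunk ++ [c]).length := by simp
          _ ≤ _ := ih (chunk ++ [c])

theorem pvTakeChunk_cons_pos (limit : Int) (c : Char) (rs : List Char) :
    1 ≤ (pvTakeChunk limit [] (c :: rs)).length := by
  have h : pvTakeChunk limit [] (c :: rs) = pvTakeChunk limit [c] rs := by
    simp [pvTakeChunk]
  rw [h]; simpa using pvTakeChunk_len limit rs [c]

-- A's outer `while remaining` loop
def pvLoopA (limit : Int) (remaining : List Char) (folded : List String) : List String :=
  match remaining with
  | [] => folded
  | c :: rs =>
      let chunk := pvTakeChunk limit [] (c :: rs)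
      let folded' := folded ++
        [if folded.isEmpty then String.ofList chunk else String.ofList (' ' :: chunk)]
      pvLoopA limit ((c :: rs).drop chunk.length) folded'
termination_by remaining.length
decreasing_by
  have h1 := pvTakeChunk_cons_pos limit c rs
  simp only [List.length_drop, List.length_cons]
  omega

def fold_ics_line_py (line : String) (limit : Int) : List String :=
  if (pvUtf8len line.toList : Int) ≤ limit then [line]
  else pvLoopA limit line.toList []

-- ===== PORT B =====
-- B's single pass: state = (folded so far, current chunk, running UTF-8 byte count)
def pvLoopB (limit : Int) : List Char → List String → List Char → Nat → List String
  | [], folded, chunk, _ =>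
      if chunk = [] then folded
      else folded ++
        [if folded.isEmpty then String.ofList chunk else String.ofList (' ' :: chunk)]
  | c :: rs, folded, chunk, bytes =>
      let b := c.utf8Size
      if chunk ≠ [] ∧ (bytes + b : Int) > limit then
        pvLoopB limit rs
          (folded ++ [if folded.isEmpty then String.ofList chunk else String.ofList (' ' :: chunk)])
          [c] b
      else pvLoopB limit rs folded (chunk ++ [c]) (bytes + b)

def fold_ics_line_py_alt (line : String) (limit : Int) : List String :=
  if (pvUtf8len line.toList : Int) ≤ limit then [line]
  else pvLoopB limit line.toList [] [] 0

-- ===== PRECONDITION & SPEC =====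
def Spec_fold_ics_line_py (line : String) (limit : Int) (out : List String) : Prop := out = fold_ics_line_py_alt line limit
instance (line : String) (limit : Int) (out : List String) : Decidable (Spec_fold_ics_line_py line limit out) := by unfold Spec_fold_ics_line_py; infer_instance

-- ===== CLAIM (what is proved, stated in full; the proofs are below) =====
def Claim_equal_fold_ics_line_py : Prop := ∀ (line : String) (limit : Int), Dom_fold_ics_line_py line limit → Spec_fold_ics_line_py line limit (fold_ics_line_py line limit)

-- ===== LEMMAS AND PROOFS =====

theorem pvLoopA_nil (limit : Int) (folded : List String) :
    pvLoopA limit [] folded = folded := by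
  rw [pvLoopA.eq_def]

theorem pvLoopA_cons (limit : Int) (c : Char) (rs : List Char) (folded : List String) :
    pvLoopA limit (c :: rs) folded =
      pvLoopA limit ((c :: rs).drop (pvTakeChunk limit [] (c :: rs)).length)
        (folded ++ [if folded.isEmpty then String.ofList (pvTakeChunk limit [] (c :: rs))
                    else String.ofList (' ' :: pvTakeChunk limit [] (c :: rs))]) := by
  rw [pvLoopA.eq_def]


theorem pvUtf8len_append (a b : List Char) :
    pvUtf8len (a ++ b) = pvUtf8len a + pvUtf8len b := by
  simp [pvUtf8len]

-- takeChunk walks through an already-accepted prefix without breaking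
theorem pvTakeChunk_shift (limit : Int) (d : List Char) :
    ∀ ch rest, ch ≠ [] → (pvUtf8len (ch ++ d) : Int) ≤ limit →
      pvTakeChunk limit ch (d ++ rest) = pvTakeChunk limit (ch ++ d) rest := by
  induction d with
  | nil => intro ch rest _ _; simp
  | cons a d' ih =>
      intro ch rest hne hle
      have hmono : (pvUtf8len (ch ++ [a]) : Int) ≤ limit := by
        have : pvUtf8len (ch ++ [a]) ≤ pvUtf8len (ch ++ a :: d') := by
          simp [pvUtf8len]
        omega
      have : ¬ ((pvUtf8len (ch ++ [a]) : Int) > limit ∧ ch ≠ []) := by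
        intro h; omega
      simp only [List.cons_append, pvTakeChunk, if_neg this]
      rw [ih (ch ++ [a]) rest (by simp) (by simpa using hle)]
      simp

theorem pvTakeChunk_self (limit : Int) (chunk rest : List Char)
    (hne : chunk ≠ [])
    (hinv : (pvUtf8len chunk : Int) ≤ limit ∨ chunk.length = 1) :
    pvTakeChunk limit [] (chunk ++ rest) = pvTakeChunk limit chunk rest := by
  obtain ⟨a, ch, rfl⟩ : ∃ a ch, chunk = a :: ch := by
    cases chunk with
    | nil => exact absurd rfl hne
    | cons a ch => exact ⟨a, ch, rfl⟩
  have step : pvTakeChunk limit [] ((a :: ch) ++ rest) = pvTakeChunk limit [a] (ch ++ rest) := by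
    simp [pvTakeChunk]
  rw [step]
  rcases hinv with hle | h1
  · rw [pvTakeChunk_shift limit ch [a] rest (by simp) (by simpa using hle)]
    simp
  · have : ch = [] := by simpa using h1
    subst this; simp

-- Main invariant: B mid-pass = A restarted on chunk ++ rest
theorem pvLoopB_eq_loopA (limit : Int) :
    ∀ (rest chunk : List Char) (folded : List String), chunk ≠ [] →
      ((pvUtf8len chunk : Int) ≤ limit ∨ chunk.length = 1) →
      pvLoopB limit rest folded chunk (pvUtf8len chunk) =
        pvLoopA limit (chunk ++ rest) folded := by
  intro rest
  induction rest with
  | nil =>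
      intro chunk folded hne hinv
      rw [List.append_nil]
      obtain ⟨a, ch, rfl⟩ : ∃ a ch, chunk = a :: ch := by
        cases chunk with
        | nil => exact absurd rfl hne
        | cons a ch => exact ⟨a, ch, rfl⟩
      rw [pvLoopA_cons]
      have hchunk : pvTakeChunk limit [] (a :: ch) = a :: ch := by
        have := pvTakeChunk_self limit (a :: ch) [] hne hinv
        simpa [pvTakeChunk] using this
      simp [pvLoopB, hchunk, pvLoopA_nil]
  | cons c rs ih =>
      intro chunk folded hne hinv
      rw [pvLoopB]
      by_cases hover : (pvUtf8len chunk + (c.utf8Size : Int) : Int) > limit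
      · rw [if_pos ⟨hne, by exact_mod_cast hover⟩]
        have hb : (c.utf8Size : Nat) = pvUtf8len [c] := by simp [pvUtf8len]
        rw [hb, ih [c] _ (by simp) (Or.inr (by simp))]
        -- now compute A's step on chunk ++ c :: rs
        obtain ⟨a, ch, rfl⟩ : ∃ a ch, chunk = a :: ch := by
          cases chunk with
          | nil => exact absurd rfl hne
          | cons a ch => exact ⟨a, ch, rfl⟩
        rw [show (a :: ch) ++ c :: rs = a :: (ch ++ c :: rs) from by simp]
        rw [pvLoopA_cons]
        have hchunk : pvTakeChunk limit [] (a :: (ch ++ c :: rs)) = a :: ch := by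
          rw [show a :: (ch ++ c :: rs) = (a :: ch) ++ (c :: rs) from by simp]
          rw [pvTakeChunk_self limit (a :: ch) (c :: rs) hne hinv]
          rw [pvTakeChunk]
          rw [if_pos ⟨by rw [pvUtf8len_append]; push_cast; simp [pvUtf8len] at hover ⊢; omega, hne⟩]
        rw [hchunk]
        have hdrop : ((a :: (ch ++ c :: rs)).drop (a :: ch).length) = c :: rs := by
          rw [show a :: (ch ++ c :: rs) = (a :: ch) ++ (c :: rs) from by simp, List.drop_left]
        rw [hdrop]
        simp
      · rw [if_neg (by intro h; exact hover (by exact_mod_cast h.2))]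
        have hb : pvUtf8len chunk + c.utf8Size = pvUtf8len (chunk ++ [c]) := by
          simp [pvUtf8len]
        rw [hb, ih (chunk ++ [c]) folded (by simp)
          (Or.inl (by rw [pvUtf8len_append]; push_cast; simp [pvUtf8len] at hover ⊢; omega))]
        simp

-- ===== VERDICT (by name: the statement is the Claim_ definition above) =====
theorem fold_ics_line_py_spec : Claim_equal_fold_ics_line_py := by
  intro line limit _
  unfold Spec_fold_ics_line_py fold_ics_line_py fold_ics_line_py_alt
  by_cases hle : (pvUtf8len line.toList : Int) ≤ limit
  · rw [if_pos hle, if_pos hle]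
  · rw [if_neg hle, if_neg hle]
    cases h : line.toList with
    | nil => simp [pvLoopB, pvLoopA_nil]
    | cons c cs =>
        rw [pvLoopB]
        rw [if_neg (by simp)]
        have hb : (0 + c.utf8Size : Nat) = pvUtf8len ([] ++ [c]) := by simp [pvUtf8len]
        rw [hb]
        rw [pvLoopB_eq_loopA limit cs ([] ++ [c]) [] (by simp) (Or.inr (by simp))]
        simp
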